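-- pv_equiv track=rewrite | github.com/omerfazil08/grad_proj_2 | evolution_colab_phase72 (2).py | trace_active_gates
-- ===== SOURCE A (Python) =====
-- def trace_active_gates(individual, solved_indices, num_inputs, num_outputs):
--     """Identifies only gates that actually contribute to solved outputs."""
--     keep_indices = set()
--
--     for out_i in solved_indices:
--         # Standard output mapping for Phase 3: Last N gates
--         gate_idx = len(individual) - num_outputs + out_i
--
--         stack = [gate_idx]
--         keep_indices.add(gate_idx)
--         while stack:
--             curr = stack.pop()
--             if curr >= len(individual): continue
--             g = individual[curr]
--             for inp in g['inputs']:
--                 if inp >= num_inputs: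
--                     src_idx = inp - num_inputs
--                     if src_idx not in keep_indices:
--                         keep_indices.add(src_idx)
--                         stack.append(src_idx)
--     return sorted(list(keep_indices))
-- ===== SOURCE B (Python) =====
-- def trace_active_gates(individual, solved_indices, num_inputs, num_outputs):
--     """Identifies only gates that actually contribute to solved outputs."""
--     keep_indices = set()
--
--     def visit(idx):
--         if idx in keep_indices:
--             return
--         keep_indices.add(idx)
--         if idx < len(individual):
--             for inp in individual[idx]['inputs']:
--                 if inp >= num_inputs:
--                     visit(inp - num_inputs)
--
--     for out_i in solved_indices:
--         visit(len(individual) - num_outputs + out_i)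
--     return sorted(keep_indices)
-- ===== Notes on version B (the rewrite author's own statement) =====
-- stated objective: simpler
-- what changed: The explicit-stack worklist with per-seed re-push is replaced by a recursive depth-first visit(idx) helper that checks the visited set at call time, seeded once per solved output; same visited set, different traversal order and control structure.
-- outside the precondition, e.g. on trace_active_gates([{'inputs': []}, {'x': [1]}], [0], 0, 2): A returns [0], B returns [0]
import Mathlib
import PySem

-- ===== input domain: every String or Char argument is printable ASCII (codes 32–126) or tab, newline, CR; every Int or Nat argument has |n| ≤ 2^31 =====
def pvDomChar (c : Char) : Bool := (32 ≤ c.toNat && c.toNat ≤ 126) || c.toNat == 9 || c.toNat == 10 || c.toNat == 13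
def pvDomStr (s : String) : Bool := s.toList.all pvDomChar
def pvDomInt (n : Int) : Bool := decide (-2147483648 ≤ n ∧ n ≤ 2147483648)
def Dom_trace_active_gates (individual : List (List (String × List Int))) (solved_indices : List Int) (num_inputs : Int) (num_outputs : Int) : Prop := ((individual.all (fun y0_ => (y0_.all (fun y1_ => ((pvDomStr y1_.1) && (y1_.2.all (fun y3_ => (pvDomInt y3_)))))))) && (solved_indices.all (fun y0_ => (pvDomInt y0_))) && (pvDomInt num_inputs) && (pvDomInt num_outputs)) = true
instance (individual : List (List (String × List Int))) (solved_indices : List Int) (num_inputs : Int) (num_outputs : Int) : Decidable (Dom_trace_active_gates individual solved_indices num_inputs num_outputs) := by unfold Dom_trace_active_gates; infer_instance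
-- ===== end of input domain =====

-- B replaces A's explicit-stack worklist by a recursive depth-first visit helper (simpler control
-- structure; same visited set, different traversal order); proved to return the same sorted list on Pre_.

-- g['inputs']  (dict lookup, first match; none = KeyError)
def pvGetInputs (g : List (String × List Int)) : Option (List Int) :=
  PySem.Dict.get? (PySem.Dict.mk g) "inputs"

-- total number of input entries over all gates (used only to size the totalization fuel)
def pvTotalInputs (individual : List (List (String × List Int))) : Nat :=
  individual.foldl (fun a g => a + ((pvGetInputs g).getD []).length) 0

-- ===== PORT A =====
-- inner "for inp in g['inputs']" loop: pushes unseen sources, records them as kept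
def pvAExpand (num_inputs : Int) (inputs : List Int) (st : List Int × PySem.Set Int) :
    List Int × PySem.Set Int :=
  inputs.foldl (fun st inp =>
    if num_inputs ≤ inp then
      let src := inp - num_inputs
      if PySem.Set.contains st.2 src then st
      else (src :: st.1, PySem.Set.add st.2 src)
    else st) st

-- 'while stack:' loop; head of the list is the top of Python's stack (stack.pop()/append at the end).
-- Fuel only totalizes the loop; on inputs admitted by Pre_ it never runs out (proved below).
-- The 'none' branches are Python's IndexError/KeyError, unreachable under Pre_.
def pvALoop (individual : List (List (String × List Int))) (num_inputs : Int) :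
    Nat → List Int → PySem.Set Int → PySem.Set Int
  | 0, _, keep => keep
  | _ + 1, [], keep => keep
  | f + 1, curr :: stack, keep =>
    if (individual.length : Int) ≤ curr then pvALoop individual num_inputs f stack keep
    else
      match PySem.List.pyGet? individual curr with
      | none => keep
      | some g =>
        match pvGetInputs g with
        | none => keep
        | some inputs =>
          let st := pvAExpand num_inputs inputs (stack, keep)
          pvALoop individual num_inputs f st.1 st.2

def trace_active_gates (individual : List (List (String × List Int))) (solved_indices : List Int) (num_inputs : Int) (num_outputs : Int) : List Int :=
  let keep := solved_indices.foldl (fun keep out_i =>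
    let gate_idx := (individual.length : Int) - num_outputs + out_i
    pvALoop individual num_inputs (2 * pvTotalInputs individual + 2) [gate_idx]
      (PySem.Set.add keep gate_idx)) PySem.Set.empty
  PySem.List.sorted keep (fun x => x) false

-- ===== PORT B =====
-- recursive 'visit(idx)'; fuel only totalizes the recursion (never runs out under Pre_, proved below)
def pvBVisit (individual : List (List (String × List Int))) (num_inputs : Int) :
    Nat → Int → PySem.Set Int → PySem.Set Int
  | 0, _, keep => keep
  | f + 1, idx, keep =>
    if PySem.Set.contains keep idx then keep
    else
      let keep1 := PySem.Set.add keep idx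
      if idx < (individual.length : Int) then
        match PySem.List.pyGet? individual idx with
        | none => keep1
        | some g =>
          match pvGetInputs g with
          | none => keep1
          | some inputs =>
            inputs.foldl (fun k inp =>
              if num_inputs ≤ inp then pvBVisit individual num_inputs f (inp - num_inputs) k
              else k) keep1
      else keep1

def trace_active_gates_alt (individual : List (List (String × List Int))) (solved_indices : List Int) (num_inputs : Int) (num_outputs : Int) : List Int :=
  let keep := solved_indices.foldl (fun keep out_i =>
    pvBVisit individual num_inputs (pvTotalInputs individual + 2)
      ((individual.length : Int) - num_outputs + out_i) keep) PySem.Set.empty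
  PySem.List.sorted keep (fun x => x) false

-- ===== PRECONDITION & SPEC =====
-- Pre_ excludes (i) inputs where A raises IndexError (a seed index below -len(individual)) or
-- KeyError (the traversal reaching a gate without an 'inputs' key) — B raises there too — and,
-- as a benign over-approximation of the KeyError case, inputs where some gate lacks the
-- 'inputs' key but happens to be unreachable from every in-range seed, on which A returns.
def Pre_trace_active_gates (individual : List (List (String × List Int))) (solved_indices : List Int) (num_inputs : Int) (num_outputs : Int) : Prop :=
  (∀ out_i ∈ solved_indices, -(individual.length : Int) ≤ (individual.length : Int) - num_outputs + out_i) ∧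
  ((∀ out_i ∈ solved_indices, (individual.length : Int) ≤ (individual.length : Int) - num_outputs + out_i) ∨
   (∀ g ∈ individual, (pvGetInputs g).isSome = true))
instance (individual : List (List (String × List Int))) (solved_indices : List Int) (num_inputs : Int) (num_outputs : Int) : Decidable (Pre_trace_active_gates individual solved_indices num_inputs num_outputs) := by unfold Pre_trace_active_gates; infer_instance

def pvWitness_trace_active_gates : (List (List (String × List Int))) × List Int × Int × Int :=
  ([[("inputs", [0, 3])], [("inputs", [2])]], [0, 1], 2, 1)

def Spec_trace_active_gates (individual : List (List (String × List Int))) (solved_indices : List Int) (num_inputs : Int) (num_outputs : Int) (out : List Int) : Prop := out = trace_active_gates_alt individual solved_indices num_inputs num_outputs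
instance (individual : List (List (String × List Int))) (solved_indices : List Int) (num_inputs : Int) (num_outputs : Int) (out : List Int) : Decidable (Spec_trace_active_gates individual solved_indices num_inputs num_outputs out) := by unfold Spec_trace_active_gates; infer_instance

-- ===== CLAIM (what is proved, stated in full; the proofs are below) =====
def Claim_equal_trace_active_gates : Prop := ∀ (individual : List (List (String × List Int))) (solved_indices : List Int) (num_inputs : Int) (num_outputs : Int), Dom_trace_active_gates individual solved_indices num_inputs num_outputs → Pre_trace_active_gates individual solved_indices num_inputs num_outputs → Spec_trace_active_gates individual solved_indices num_inputs num_outputs (trace_active_gates individual solved_indices num_inputs num_outputs)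

-- ===== LEMMAS AND PROOFS =====

-- the successors of node a in the dependency graph (as both programs compute them)
def pvChildren (ind : List (List (String × List Int))) (ni : Int) (a : Int) : List Int :=
  if (ind.length : Int) ≤ a then []
  else
    ((((PySem.List.pyGet? ind a).bind pvGetInputs).getD []).filter
      (fun inp => decide (ni ≤ inp))).map (fun inp => inp - ni)

-- every possible source index (a superset of every node's children)
def pvAllSrcs (ind : List (List (String × List Int))) (ni : Int) : List Int :=
  ind.flatMap (fun g => (((pvGetInputs g).getD []).filter (fun inp => decide (ni ≤ inp))).map (fun inp => inp - ni))

-- number of still-unvisited possible sources (the termination measure)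
def pvCnt (ind : List (List (String × List Int))) (ni : Int) (keep : List Int) : Nat :=
  ((pvAllSrcs ind ni).toFinset.filter (fun u => u ∉ keep)).card

-- "C is closed under the dependency edges"
def pvClosed (ind : List (List (String × List Int))) (ni : Int) (C : List Int) : Prop :=
  ∀ a ∈ C, ∀ b ∈ pvChildren ind ni a, b ∈ C

theorem pvMem_children_allSrcs (ind : List (List (String × List Int))) (ni a b : Int)
    (hb : b ∈ pvChildren ind ni a) : b ∈ pvAllSrcs ind ni := by
  unfold pvChildren at hb
  by_cases hlen : (ind.length : Int) ≤ a
  · simp [hlen] at hb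
  · rw [if_neg hlen] at hb
    cases hget : PySem.List.pyGet? ind a with
    | none => simp [hget] at hb
    | some g =>
      cases hin : pvGetInputs g with
      | none => simp [hget, hin] at hb
      | some inputs =>
        simp only [hget, hin, Option.bind_some, Option.getD_some] at hb
        unfold pvAllSrcs
        refine List.mem_flatMap.mpr ⟨g, PySem.List.mem_of_pyGet?_eq_some _ hget, ?_⟩
        simpa [hin] using hb

theorem pvCnt_le (ind : List (List (String × List Int))) (ni : Int) (keep : List Int) :
    pvCnt ind ni keep ≤ (pvAllSrcs ind ni).length :=
  (Finset.card_filter_le _ _).trans (pvAllSrcs ind ni).toFinset_card_le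

theorem pvCnt_mono (ind : List (List (String × List Int))) (ni : Int) {k1 k2 : List Int}
    (h : ∀ x ∈ k1, x ∈ k2) : pvCnt ind ni k2 ≤ pvCnt ind ni k1 := by
  apply Finset.card_le_card
  intro u hu
  simp only [Finset.mem_filter] at hu ⊢
  exact ⟨hu.1, fun hc => hu.2 (h u hc)⟩

theorem pvCnt_append (ind : List (List (String × List Int))) (ni : Int) (keep news : List Int)
    (hnew : ∀ y ∈ news, y ∈ pvAllSrcs ind ni ∧ y ∉ keep) (hnd : news.Nodup) :
    pvCnt ind ni (keep ++ news) + news.length = pvCnt ind ni keep := by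
  classical
  have hsub : news.toFinset ⊆ (pvAllSrcs ind ni).toFinset.filter (fun u => u ∉ keep) := by
    intro u hu
    rw [List.mem_toFinset] at hu
    obtain ⟨h1, h2⟩ := hnew u hu
    simp [Finset.mem_filter, List.mem_toFinset, h1, h2]
  have hset : (pvAllSrcs ind ni).toFinset.filter (fun u => u ∉ keep ++ news)
      = ((pvAllSrcs ind ni).toFinset.filter (fun u => u ∉ keep)) \ news.toFinset := by
    ext u
    simp only [Finset.mem_filter, Finset.mem_sdiff, List.mem_append, List.mem_toFinset]
    tauto
  have hcard := Finset.card_le_card hsub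
  have hint : news.toFinset ∩ ((pvAllSrcs ind ni).toFinset.filter (fun u => u ∉ keep))
      = news.toFinset := Finset.inter_eq_left.mpr hsub
  unfold pvCnt
  rw [hset, Finset.card_sdiff, hint, List.toFinset_card_of_nodup hnd]
  rw [List.toFinset_card_of_nodup hnd] at hcard
  omega

theorem pvAExpand_spec (ni : Int) (inputs : List Int) : ∀ (stack keep : List Int),
    ∃ news : List Int,
      pvAExpand ni inputs (stack, keep) = (news.reverse ++ stack, keep ++ news) ∧
      news.Nodup ∧
      (∀ y ∈ news, y ∉ keep ∧ ∃ inp ∈ inputs, ni ≤ inp ∧ y = inp - ni) ∧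
      (∀ inp ∈ inputs, ni ≤ inp → inp - ni ∈ keep ++ news) := by
  induction inputs with
  | nil =>
    intro stack keep
    exact ⟨[], by simp [pvAExpand], by simp, by simp, by simp⟩
  | cons inp rest ih =>
    intro stack keep
    by_cases hg : ni ≤ inp
    · by_cases hc : inp - ni ∈ keep
      · have hstep : pvAExpand ni (inp :: rest) (stack, keep) = pvAExpand ni rest (stack, keep) := by
          simp [pvAExpand, hg, hc]
        obtain ⟨news, h1, h2, h3, h4⟩ := ih stack keep
        refine ⟨news, hstep ▸ h1, h2, ?_, ?_⟩
        · intro y hy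
          obtain ⟨hk, w, hw1, hw2⟩ := h3 y hy
          exact ⟨hk, w, List.mem_cons_of_mem _ hw1, hw2⟩
        · intro i hi hgi
          rcases List.mem_cons.mp hi with rfl | hi
          · exact List.mem_append.mpr (Or.inl hc)
          · exact h4 i hi hgi
      · have hadd : PySem.Set.add keep (inp - ni) = keep ++ [inp - ni] :=
          PySem.Set.add_of_not_mem hc
        have hstep : pvAExpand ni (inp :: rest) (stack, keep)
            = pvAExpand ni rest ((inp - ni) :: stack, keep ++ [inp - ni]) := by
          simp [pvAExpand, hg, hc]
        obtain ⟨news, h1, h2, h3, h4⟩ := ih ((inp - ni) :: stack) (keep ++ [inp - ni])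
        refine ⟨(inp - ni) :: news, ?_, ?_, ?_, ?_⟩
        · rw [hstep, h1]
          simp
        · refine List.nodup_cons.mpr ⟨?_, h2⟩
          intro hmem
          exact (h3 _ hmem).1 (by simp)
        · intro y hy
          rcases List.mem_cons.mp hy with rfl | hy
          · exact ⟨hc, inp, List.mem_cons_self, hg, rfl⟩
          · obtain ⟨hk, w, hw1, hw2⟩ := h3 y hy
            refine ⟨fun hk' => hk (by simp [hk']), w, List.mem_cons_of_mem _ hw1, hw2⟩
        · intro i hi hgi
          rcases List.mem_cons.mp hi with rfl | hi
          · simp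
          · have := h4 i hi hgi
            simp only [List.mem_append, List.mem_cons] at this ⊢
            tauto
    · have hstep : pvAExpand ni (inp :: rest) (stack, keep) = pvAExpand ni rest (stack, keep) := by
        simp [pvAExpand, hg]
      obtain ⟨news, h1, h2, h3, h4⟩ := ih stack keep
      refine ⟨news, hstep ▸ h1, h2, ?_, ?_⟩
      · intro y hy
        obtain ⟨hk, w, hw1, hw2⟩ := h3 y hy
        exact ⟨hk, w, List.mem_cons_of_mem _ hw1, hw2⟩
      · intro i hi hgi
        rcases List.mem_cons.mp hi with rfl | hi
        · exact absurd hgi hg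
        · exact h4 i hi hgi

theorem pvALoop_nil (ind : List (List (String × List Int))) (ni : Int) (f : Nat) (keep : List Int) :
    pvALoop ind ni f [] keep = keep := by
  cases f <;> simp [pvALoop]

theorem pvALoop_mono (ind : List (List (String × List Int))) (ni : Int) :
    ∀ (f : Nat) (stack keep : List Int), ∀ y ∈ keep, y ∈ pvALoop ind ni f stack keep := by
  intro f
  induction f with
  | zero => intro stack keep y hy; simpa [pvALoop] using hy
  | succ f ih =>
    intro stack keep y hy
    cases stack with
    | nil => simpa [pvALoop] using hy
    | cons curr stack =>
      by_cases hlen : (ind.length : Int) ≤ curr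
      · simpa [pvALoop, hlen] using ih stack keep y hy
      · cases hget : PySem.List.pyGet? ind curr with
        | none => simpa [pvALoop, hlen, hget] using hy
        | some g =>
          cases hin : pvGetInputs g with
          | none => simpa [pvALoop, hlen, hget, hin] using hy
          | some inputs =>
            obtain ⟨news, h1, _, _, _⟩ := pvAExpand_spec ni inputs stack keep
            have heq : pvALoop ind ni (f + 1) (curr :: stack) keep
                = pvALoop ind ni f (news.reverse ++ stack) (keep ++ news) := by
              simp [pvALoop, hlen, hget, hin, h1]
            rw [heq]
            exact ih _ _ y (by simp [hy])

theorem pvALoop_subset (ind : List (List (String × List Int))) (ni : Int) (C : List Int)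
    (hC : pvClosed ind ni C) :
    ∀ (f : Nat) (stack keep : List Int), (∀ x ∈ stack, x ∈ C) → (∀ x ∈ keep, x ∈ C) →
      ∀ y ∈ pvALoop ind ni f stack keep, y ∈ C := by
  intro f
  induction f with
  | zero => intro stack keep _ hkeep y hy; exact hkeep y (by simpa [pvALoop] using hy)
  | succ f ih =>
    intro stack keep hstack hkeep y hy
    cases stack with
    | nil => exact hkeep y (by simpa [pvALoop] using hy)
    | cons curr stack =>
      by_cases hlen : (ind.length : Int) ≤ curr
      · rw [show pvALoop ind ni (f + 1) (curr :: stack) keep = pvALoop ind ni f stack keep by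
          simp [pvALoop, hlen]] at hy
        exact ih stack keep (fun x hx => hstack x (List.mem_cons_of_mem _ hx)) hkeep y hy
      · cases hget : PySem.List.pyGet? ind curr with
        | none => exact hkeep y (by simpa [pvALoop, hlen, hget] using hy)
        | some g =>
          cases hin : pvGetInputs g with
          | none => exact hkeep y (by simpa [pvALoop, hlen, hget, hin] using hy)
          | some inputs =>
            obtain ⟨news, h1, _, h3, _⟩ := pvAExpand_spec ni inputs stack keep
            rw [show pvALoop ind ni (f + 1) (curr :: stack) keep
                = pvALoop ind ni f (news.reverse ++ stack) (keep ++ news) by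
              simp [pvALoop, hlen, hget, hin, h1]] at hy
            have hch : pvChildren ind ni curr
                = (inputs.filter (fun inp => decide (ni ≤ inp))).map (fun inp => inp - ni) := by
              simp [pvChildren, hlen, hget, hin]
            have hnewsC : ∀ x ∈ news, x ∈ C := by
              intro x hx
              obtain ⟨_, w, hw1, hw2⟩ := h3 x hx
              refine hC curr (hstack curr List.mem_cons_self) x ?_
              rw [hch]
              exact List.mem_map.mpr ⟨w, List.mem_filter.mpr ⟨hw1, by simpa using hw2.1⟩, hw2.2.symm⟩
            refine ih _ _ ?_ ?_ y hy
            · intro x hx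
              rcases List.mem_append.mp hx with hx | hx
              · exact hnewsC x (List.mem_reverse.mp hx)
              · exact hstack x (List.mem_cons_of_mem _ hx)
            · intro x hx
              rcases List.mem_append.mp hx with hx | hx
              · exact hkeep x hx
              · exact hnewsC x hx

theorem pvALoop_nodup (ind : List (List (String × List Int))) (ni : Int) :
    ∀ (f : Nat) (stack keep : List Int), keep.Nodup → (pvALoop ind ni f stack keep).Nodup := by
  intro f
  induction f with
  | zero => intro stack keep h; simpa [pvALoop]
  | succ f ih =>
    intro stack keep h
    cases stack with
    | nil => simpa [pvALoop]
    | cons curr stack =>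
      by_cases hlen : (ind.length : Int) ≤ curr
      · simpa [pvALoop, hlen] using ih stack keep h
      · cases hget : PySem.List.pyGet? ind curr with
        | none => simpa [pvALoop, hlen, hget]
        | some g =>
          cases hin : pvGetInputs g with
          | none => simpa [pvALoop, hlen, hget, hin]
          | some inputs =>
            obtain ⟨news, h1, h2, h3, _⟩ := pvAExpand_spec ni inputs stack keep
            rw [show pvALoop ind ni (f + 1) (curr :: stack) keep
                = pvALoop ind ni f (news.reverse ++ stack) (keep ++ news) by
              simp [pvALoop, hlen, hget, hin, h1]]
            refine ih _ _ (List.Nodup.append h h2 ?_)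
            intro a ha hb
            exact (h3 a hb).1 ha

-- A's loop empties its stack within its fuel and leaves a closed set
theorem pvALoop_closed (ind : List (List (String × List Int))) (ni : Int)
    (hok : ∀ g ∈ ind, (pvGetInputs g).isSome = true) :
    ∀ (f : Nat) (stack keep : List Int),
      stack.length + 2 * pvCnt ind ni keep < f →
      (∀ x ∈ stack, x ∈ keep) →
      (∀ x ∈ stack, -(ind.length : Int) ≤ x) →
      (∀ x ∈ keep, x ∈ stack ∨ ∀ b ∈ pvChildren ind ni x, b ∈ keep) →
      pvClosed ind ni (pvALoop ind ni f stack keep) := by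
  intro f
  induction f with
  | zero => intro stack keep hf _ _ _; omega
  | succ f ih =>
    intro stack keep hf hsk hrange hinv
    cases stack with
    | nil =>
      rw [pvALoop_nil]
      intro a ha b hb
      rcases hinv a ha with h | h
      · simp at h
      · exact h b hb
    | cons curr stack =>
      by_cases hlen : (ind.length : Int) ≤ curr
      · have hch : pvChildren ind ni curr = [] := by simp [pvChildren, hlen]
        rw [show pvALoop ind ni (f + 1) (curr :: stack) keep = pvALoop ind ni f stack keep by
          simp [pvALoop, hlen]]
        refine ih stack keep (by simp at hf ⊢; omega)
          (fun x hx => hsk x (List.mem_cons_of_mem _ hx))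
          (fun x hx => hrange x (List.mem_cons_of_mem _ hx)) ?_
        intro x hx
        rcases hinv x hx with hm | hcl
        · rcases List.mem_cons.mp hm with rfl | hm
          · right; rw [hch]; simp
          · left; exact hm
        · right; exact hcl
      · have hcur_lo : -(ind.length : Int) ≤ curr := hrange curr List.mem_cons_self
        cases hget : PySem.List.pyGet? ind curr with
        | none =>
          exfalso
          rw [PySem.List.pyGet?_eq_none_iff] at hget
          exact hget ⟨by omega, by omega⟩
        | some g =>
          have hgmem : g ∈ ind := PySem.List.mem_of_pyGet?_eq_some _ hget
          obtain ⟨inputs, hin⟩ := Option.isSome_iff_exists.mp (hok g hgmem)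
          obtain ⟨news, h1, h2, h3, h4⟩ := pvAExpand_spec ni inputs stack keep
          have hch : pvChildren ind ni curr
              = (inputs.filter (fun inp => decide (ni ≤ inp))).map (fun inp => inp - ni) := by
            simp [pvChildren, hlen, hget, hin]
          have hnews_child : ∀ y ∈ news, y ∈ pvChildren ind ni curr := by
            intro y hy
            obtain ⟨_, w, hw1, hw2⟩ := h3 y hy
            rw [hch]
            exact List.mem_map.mpr ⟨w, List.mem_filter.mpr ⟨hw1, by simpa using hw2.1⟩, hw2.2.symm⟩
          have hcnt : pvCnt ind ni (keep ++ news) + news.length = pvCnt ind ni keep :=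
            pvCnt_append ind ni keep news
              (fun y hy => ⟨pvMem_children_allSrcs ind ni curr y (hnews_child y hy), (h3 y hy).1⟩) h2
          rw [show pvALoop ind ni (f + 1) (curr :: stack) keep
              = pvALoop ind ni f (news.reverse ++ stack) (keep ++ news) by
            simp [pvALoop, hlen, hget, hin, h1]]
          refine ih _ _ ?_ ?_ ?_ ?_
          · simp only [List.length_append, List.length_reverse, List.length_cons] at hf ⊢
            omega
          · intro x hx
            rcases List.mem_append.mp hx with hx | hx
            · exact List.mem_append.mpr (Or.inr (List.mem_reverse.mp hx))
            · exact List.mem_append.mpr (Or.inl (hsk x (List.mem_cons_of_mem _ hx)))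
          · intro x hx
            rcases List.mem_append.mp hx with hx | hx
            · obtain ⟨_, w, _, hw2⟩ := h3 x (List.mem_reverse.mp hx)
              have : (0 : Int) ≤ x := by omega
              have hnn : (0 : Int) ≤ (ind.length : Int) := Int.natCast_nonneg _
              omega
            · exact hrange x (List.mem_cons_of_mem _ hx)
          · intro x hx
            rcases List.mem_append.mp hx with hx | hx
            · rcases hinv x hx with hm | hcl
              · rcases List.mem_cons.mp hm with rfl | hm
                · right
                  intro b hb
                  rw [hch] at hb
                  obtain ⟨w, hw1, hw2⟩ := List.mem_map.mp hb
                  have hw1' := List.mem_filter.mp hw1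
                  exact hw2 ▸ h4 w hw1'.1 (by simpa using hw1'.2)
                · left; exact List.mem_append.mpr (Or.inr hm)
              · right; intro b hb; exact List.mem_append.mpr (Or.inl (hcl b hb))
            · left; exact List.mem_append.mpr (Or.inl (List.mem_reverse.mpr hx))

-- ===== B-side lemmas =====

theorem pvBVisit_contains (ind : List (List (String × List Int))) (ni : Int) (f : Nat)
    (idx : Int) (keep : List Int) (h : idx ∈ keep) : pvBVisit ind ni f idx keep = keep := by
  cases f with
  | zero => simp [pvBVisit]
  | succ f => simp [pvBVisit, h]

theorem pvBFold_mono (ind : List (List (String × List Int))) (ni : Int) (f : Nat)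
    (ihf : ∀ (idx : Int) (keep : List Int), ∀ y ∈ keep, y ∈ pvBVisit ind ni f idx keep) :
    ∀ (l : List Int) (k : List Int), ∀ y ∈ k,
      y ∈ l.foldl (fun k inp => if ni ≤ inp then pvBVisit ind ni f (inp - ni) k else k) k := by
  intro l
  induction l with
  | nil => intro k y hy; simpa using hy
  | cons c rest ih =>
    intro k y hy
    simp only [List.foldl_cons]
    by_cases hg : ni ≤ c
    · rw [if_pos hg]
      exact ih _ y (ihf (c - ni) k y hy)
    · rw [if_neg hg]
      exact ih _ y hy

theorem pvBVisit_mono (ind : List (List (String × List Int))) (ni : Int) :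
    ∀ (f : Nat) (idx : Int) (keep : List Int), ∀ y ∈ keep, y ∈ pvBVisit ind ni f idx keep := by
  intro f
  induction f with
  | zero => intro idx keep y hy; simpa [pvBVisit] using hy
  | succ f ih =>
    intro idx keep y hy
    by_cases hc : idx ∈ keep
    · rw [pvBVisit_contains ind ni _ idx keep hc]; exact hy
    · have hkeep1 : y ∈ PySem.Set.add keep idx := (PySem.Set.mem_add _ _ _).mpr (Or.inl hy)
      by_cases hlen : idx < (ind.length : Int)
      · cases hget : PySem.List.pyGet? ind idx with
        | none => simpa [pvBVisit, hc, hlen, hget] using hkeep1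
        | some g =>
          cases hin : pvGetInputs g with
          | none => simpa [pvBVisit, hc, hlen, hget, hin] using hkeep1
          | some inputs =>
            rw [show pvBVisit ind ni (f + 1) idx keep
                = inputs.foldl (fun k inp => if ni ≤ inp then pvBVisit ind ni f (inp - ni) k else k)
                    (PySem.Set.add keep idx) by
              simp [pvBVisit, hc, hlen, hget, hin]]
            exact pvBFold_mono ind ni f ih inputs _ y hkeep1
      · simpa [pvBVisit, hc, hlen] using hkeep1

theorem pvBFold_subset (ind : List (List (String × List Int))) (ni : Int) (C : List Int)
    (f : Nat)
    (ihf : ∀ (idx : Int) (keep : List Int), idx ∈ C → (∀ x ∈ keep, x ∈ C) →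
      ∀ y ∈ pvBVisit ind ni f idx keep, y ∈ C) :
    ∀ (l : List Int) (k : List Int), (∀ x ∈ k, x ∈ C) →
      (∀ inp ∈ l, ni ≤ inp → inp - ni ∈ C) →
      ∀ y ∈ l.foldl (fun k inp => if ni ≤ inp then pvBVisit ind ni f (inp - ni) k else k) k, y ∈ C := by
  intro l
  induction l with
  | nil => intro k hk _ y hy; exact hk y (by simpa using hy)
  | cons c rest ih =>
    intro k hk hl y hy
    simp only [List.foldl_cons] at hy
    by_cases hg : ni ≤ c
    · rw [if_pos hg] at hy
      refine ih _ (fun x hx => ihf (c - ni) k (hl c List.mem_cons_self hg) hk x hx)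
        (fun i hi => hl i (List.mem_cons_of_mem _ hi)) y hy
    · rw [if_neg hg] at hy
      exact ih _ hk (fun i hi => hl i (List.mem_cons_of_mem _ hi)) y hy

theorem pvBVisit_subset (ind : List (List (String × List Int))) (ni : Int) (C : List Int)
    (hC : pvClosed ind ni C) :
    ∀ (f : Nat) (idx : Int) (keep : List Int), idx ∈ C → (∀ x ∈ keep, x ∈ C) →
      ∀ y ∈ pvBVisit ind ni f idx keep, y ∈ C := by
  intro f
  induction f with
  | zero => intro idx keep _ hkeep y hy; exact hkeep y (by simpa [pvBVisit] using hy)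
  | succ f ih =>
    intro idx keep hidx hkeep y hy
    by_cases hc : idx ∈ keep
    · rw [pvBVisit_contains ind ni _ idx keep hc] at hy; exact hkeep y hy
    · have hkeep1 : ∀ x ∈ PySem.Set.add keep idx, x ∈ C := by
        intro x hx
        rcases (PySem.Set.mem_add _ _ _).mp hx with hx | rfl
        · exact hkeep x hx
        · exact hidx
      by_cases hlen : idx < (ind.length : Int)
      · cases hget : PySem.List.pyGet? ind idx with
        | none => exact hkeep1 y (by simpa [pvBVisit, hc, hlen, hget] using hy)
        | some g =>
          cases hin : pvGetInputs g with
          | none => exact hkeep1 y (by simpa [pvBVisit, hc, hlen, hget, hin] using hy)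
          | some inputs =>
            rw [show pvBVisit ind ni (f + 1) idx keep
                = inputs.foldl (fun k inp => if ni ≤ inp then pvBVisit ind ni f (inp - ni) k else k)
                    (PySem.Set.add keep idx) by
              simp [pvBVisit, hc, hlen, hget, hin]] at hy
            have hch : pvChildren ind ni idx
                = (inputs.filter (fun inp => decide (ni ≤ inp))).map (fun inp => inp - ni) := by
              simp [pvChildren, not_le.mpr hlen, hget, hin]
            refine pvBFold_subset ind ni C f ih inputs _ hkeep1 ?_ y hy
            intro i hi hgi
            refine hC idx hidx (i - ni) ?_
            rw [hch]
            exact List.mem_map.mpr ⟨i, List.mem_filter.mpr ⟨hi, by simpa using hgi⟩, rfl⟩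
      · exact hkeep1 y (by simpa [pvBVisit, hc, hlen] using hy)

theorem pvBVisit_nodup (ind : List (List (String × List Int))) (ni : Int) :
    ∀ (f : Nat) (idx : Int) (keep : List Int), keep.Nodup → (pvBVisit ind ni f idx keep).Nodup := by
  intro f
  induction f with
  | zero => intro idx keep h; simpa [pvBVisit]
  | succ f ih =>
    intro idx keep h
    by_cases hc : idx ∈ keep
    · rw [pvBVisit_contains ind ni _ idx keep hc]; exact h
    · have hnd1 : (PySem.Set.add keep idx).Nodup := PySem.Set.nodup_add _ _ h
      have hfold : ∀ (l : List Int) (k : List Int), k.Nodup →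
          (l.foldl (fun k inp => if ni ≤ inp then pvBVisit ind ni f (inp - ni) k else k) k).Nodup := by
        intro l
        induction l with
        | nil => intro k hk; simpa
        | cons c rest ihl =>
          intro k hk
          simp only [List.foldl_cons]
          by_cases hg : ni ≤ c
          · rw [if_pos hg]; exact ihl _ (ih (c - ni) k hk)
          · rw [if_neg hg]; exact ihl _ hk
      by_cases hlen : idx < (ind.length : Int)
      · cases hget : PySem.List.pyGet? ind idx with
        | none => simpa [pvBVisit, hc, hlen, hget] using hnd1
        | some g =>
          cases hin : pvGetInputs g with
          | none => simpa [pvBVisit, hc, hlen, hget, hin] using hnd1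
          | some inputs =>
            rw [show pvBVisit ind ni (f + 1) idx keep
                = inputs.foldl (fun k inp => if ni ≤ inp then pvBVisit ind ni f (inp - ni) k else k)
                    (PySem.Set.add keep idx) by
              simp [pvBVisit, hc, hlen, hget, hin]]
            exact hfold inputs _ hnd1
      · simpa [pvBVisit, hc, hlen] using hnd1

-- B's visit: the argument ends up in the result, and every newly added node is fully expanded
theorem pvBVisit_closed (ind : List (List (String × List Int))) (ni : Int)
    (hok : ∀ g ∈ ind, (pvGetInputs g).isSome = true) :
    ∀ (f : Nat) (idx : Int) (keep : List Int),
      pvCnt ind ni (PySem.Set.add keep idx) + 1 ≤ f →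
      -(ind.length : Int) ≤ idx →
      idx ∈ pvBVisit ind ni f idx keep ∧
      (∀ x ∈ pvBVisit ind ni f idx keep, x ∉ keep →
        ∀ b ∈ pvChildren ind ni x, b ∈ pvBVisit ind ni f idx keep) := by
  intro f
  induction f with
  | zero => intro idx keep hf _; omega
  | succ f ih =>
    intro idx keep hf hlo
    by_cases hc : idx ∈ keep
    · rw [pvBVisit_contains ind ni _ idx keep hc]
      exact ⟨hc, fun x hx hnx _ _ => absurd hx hnx⟩
    · have hadd : PySem.Set.add keep idx = keep ++ [idx] := PySem.Set.add_of_not_mem hc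
      have hfuel1 : pvCnt ind ni (PySem.Set.add keep idx) ≤ f := by omega
      by_cases hlen : idx < (ind.length : Int)
      · cases hget : PySem.List.pyGet? ind idx with
        | none =>
          exfalso
          rw [PySem.List.pyGet?_eq_none_iff] at hget
          exact hget ⟨by omega, by omega⟩
        | some g =>
          have hgmem : g ∈ ind := PySem.List.mem_of_pyGet?_eq_some _ hget
          obtain ⟨inputs, hin⟩ := Option.isSome_iff_exists.mp (hok g hgmem)
          have hch : pvChildren ind ni idx
              = (inputs.filter (fun inp => decide (ni ≤ inp))).map (fun inp => inp - ni) := by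
            simp [pvChildren, not_le.mpr hlen, hget, hin]
          rw [show pvBVisit ind ni (f + 1) idx keep
              = inputs.foldl (fun k inp => if ni ≤ inp then pvBVisit ind ni f (inp - ni) k else k)
                  (PySem.Set.add keep idx) by
            simp [pvBVisit, hc, hlen, hget, hin]]
          -- fold invariant
          have hfold : ∀ (l : List Int) (k : List Int),
              (∀ x ∈ PySem.Set.add keep idx, x ∈ k) →
              (∀ inp ∈ l, inp ∈ inputs) →
              (∀ x ∈ k, x ∉ PySem.Set.add keep idx → ∀ b ∈ pvChildren ind ni x, b ∈ k) →
              pvCnt ind ni k ≤ pvCnt ind ni (PySem.Set.add keep idx) →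
              (∀ x ∈ k,
                x ∈ l.foldl (fun k inp => if ni ≤ inp then pvBVisit ind ni f (inp - ni) k else k) k) ∧
              (∀ inp ∈ l, ni ≤ inp → inp - ni
                ∈ l.foldl (fun k inp => if ni ≤ inp then pvBVisit ind ni f (inp - ni) k else k) k) ∧
              (∀ x ∈ l.foldl (fun k inp => if ni ≤ inp then pvBVisit ind ni f (inp - ni) k else k) k,
                x ∉ PySem.Set.add keep idx → ∀ b ∈ pvChildren ind ni x,
                b ∈ l.foldl (fun k inp => if ni ≤ inp then pvBVisit ind ni f (inp - ni) k else k) k) := by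
            intro l
            induction l with
            | nil =>
              intro k hk1 _ hk3 _
              exact ⟨fun x hx => by simpa using hx, by simp, fun x hx => hk3 x (by simpa using hx)⟩
            | cons c rest ihl =>
              intro k hk1 hsub hk3 hcnt
              simp only [List.foldl_cons]
              by_cases hg : ni ≤ c
              · rw [if_pos hg]
                have hcmem : c ∈ inputs := hsub c List.mem_cons_self
                have hchild : c - ni ∈ pvChildren ind ni idx := by
                  rw [hch]
                  exact List.mem_map.mpr ⟨c, List.mem_filter.mpr ⟨hcmem, by simpa using hg⟩, rfl⟩
                have hsrcall : c - ni ∈ pvAllSrcs ind ni :=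
                  pvMem_children_allSrcs ind ni idx (c - ni) hchild
                by_cases hck : c - ni ∈ k
                · rw [pvBVisit_contains ind ni f (c - ni) k hck]
                  obtain ⟨r1, r2, r3⟩ := ihl k hk1 (fun i hi => hsub i (List.mem_cons_of_mem _ hi))
                    hk3 hcnt
                  exact ⟨r1, fun i hi hgi => by
                    rcases List.mem_cons.mp hi with rfl | hi
                    · exact r1 _ hck
                    · exact r2 i hi hgi, r3⟩
                · -- recursive call on a fresh source
                  have haddk : PySem.Set.add k (c - ni) = k ++ [c - ni] :=
                    PySem.Set.add_of_not_mem hck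
                  have hcnt' : pvCnt ind ni (PySem.Set.add k (c - ni)) + 1 ≤ f := by
                    rw [haddk]
                    have := pvCnt_append ind ni k [c - ni]
                      (by intro y hy; rcases List.mem_singleton.mp hy with rfl; exact ⟨hsrcall, hck⟩)
                      (List.nodup_singleton _)
                    simp only [List.length_singleton] at this
                    omega
                  have hlo' : -(ind.length : Int) ≤ c - ni := by
                    have hnn : (0 : Int) ≤ (ind.length : Int) := Int.natCast_nonneg _
                    omega
                  obtain ⟨hb1, hb2⟩ := ih (c - ni) k hcnt' hlo'
                  have hmonob : ∀ y ∈ k, y ∈ pvBVisit ind ni f (c - ni) k :=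
                    pvBVisit_mono ind ni f (c - ni) k
                  obtain ⟨r1, r2, r3⟩ := ihl (pvBVisit ind ni f (c - ni) k)
                    (fun x hx => hmonob x (hk1 x hx))
                    (fun i hi => hsub i (List.mem_cons_of_mem _ hi))
                    (by
                      intro x hx hnx b hb
                      by_cases hxk : x ∈ k
                      · exact hmonob _ (hk3 x hxk hnx b hb)
                      · exact hb2 x hx hxk b hb)
                    ((pvCnt_mono ind ni hmonob).trans hcnt)
                  refine ⟨fun x hx => r1 x (hmonob x hx), fun i hi hgi => ?_, r3⟩
                  rcases List.mem_cons.mp hi with rfl | hi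
                  · exact r1 _ hb1
                  · exact r2 i hi hgi
              · rw [if_neg hg]
                obtain ⟨r1, r2, r3⟩ := ihl k hk1 (fun i hi => hsub i (List.mem_cons_of_mem _ hi))
                  hk3 hcnt
                exact ⟨r1, fun i hi hgi => by
                  rcases List.mem_cons.mp hi with rfl | hi
                  · exact absurd hgi hg
                  · exact r2 i hi hgi, r3⟩
          obtain ⟨r1, r2, r3⟩ := hfold inputs (PySem.Set.add keep idx)
            (fun x hx => hx) (fun i hi => hi)
            (fun x hx hnx => absurd hx hnx) le_rfl
          constructor
          · exact r1 idx ((PySem.Set.mem_add _ _ _).mpr (Or.inr rfl))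
          · intro x hx hnx b hb
            by_cases hx1 : x ∈ PySem.Set.add keep idx
            · rcases (PySem.Set.mem_add _ _ _).mp hx1 with hxk | rfl
              · exact absurd hxk hnx
              · rw [hch] at hb
                obtain ⟨w, hw1, hw2⟩ := List.mem_map.mp hb
                have hw1' := List.mem_filter.mp hw1
                exact hw2 ▸ r2 w hw1'.1 (by simpa using hw1'.2)
            · exact r3 x hx hx1 b hb
      · -- idx out of range: no expansion needed
        have hres : pvBVisit ind ni (f + 1) idx keep = PySem.Set.add keep idx := by
          simp [pvBVisit, hc, hlen]
        rw [hres]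
        refine ⟨(PySem.Set.mem_add _ _ _).mpr (Or.inr rfl), ?_⟩
        intro x hx hnx b hb
        rcases (PySem.Set.mem_add _ _ _).mp hx with hxk | rfl
        · exact absurd hxk hnx
        · have hch : pvChildren ind ni x = [] := by simp [pvChildren, not_lt.mp hlen]
          rw [hch] at hb
          simp at hb

-- ===== top-level folds =====

theorem pvTotalInputs_aux (ind : List (List (String × List Int))) :
    ∀ n : Nat, ind.foldl (fun a g => a + ((pvGetInputs g).getD []).length) n
      = n + (ind.map (fun g => ((pvGetInputs g).getD []).length)).sum := by
  induction ind with
  | nil => intro n; simp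
  | cons g rest ih => intro n; simp [List.foldl_cons, ih]; omega

theorem pvAllSrcs_length_le (ind : List (List (String × List Int))) (ni : Int) :
    (pvAllSrcs ind ni).length ≤ pvTotalInputs ind := by
  unfold pvAllSrcs pvTotalInputs
  rw [pvTotalInputs_aux ind 0, List.length_flatMap]
  simp only [Nat.zero_add]
  apply List.sum_le_sum
  intro g _
  simp only [List.length_map]
  exact List.length_filter_le _ _

-- A's outer fold: closed, nodup, contains all seeds, and grows monotonically
theorem pvAFold_facts (ind : List (List (String × List Int))) (ni no : Int)
    (hok : ∀ g ∈ ind, (pvGetInputs g).isSome = true) :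
    ∀ (solved : List Int) (keep : List Int), pvClosed ind ni keep → keep.Nodup →
      (∀ o ∈ solved, -(ind.length : Int) ≤ (ind.length : Int) - no + o) →
      (pvClosed ind ni (solved.foldl (fun keep out_i =>
        pvALoop ind ni (2 * pvTotalInputs ind + 2) [(ind.length : Int) - no + out_i]
          (PySem.Set.add keep ((ind.length : Int) - no + out_i))) keep) ∧
       (solved.foldl (fun keep out_i =>
        pvALoop ind ni (2 * pvTotalInputs ind + 2) [(ind.length : Int) - no + out_i]
          (PySem.Set.add keep ((ind.length : Int) - no + out_i))) keep).Nodup) ∧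
      (∀ y ∈ keep, y ∈ solved.foldl (fun keep out_i =>
        pvALoop ind ni (2 * pvTotalInputs ind + 2) [(ind.length : Int) - no + out_i]
          (PySem.Set.add keep ((ind.length : Int) - no + out_i))) keep) ∧
      (∀ o ∈ solved, (ind.length : Int) - no + o ∈ solved.foldl (fun keep out_i =>
        pvALoop ind ni (2 * pvTotalInputs ind + 2) [(ind.length : Int) - no + out_i]
          (PySem.Set.add keep ((ind.length : Int) - no + out_i))) keep) := by
  intro solved
  induction solved with
  | nil =>
    intro keep hcl hnd _
    exact ⟨⟨hcl, hnd⟩, fun y hy => by simpa using hy, by simp⟩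
  | cons o rest ih =>
    intro keep hcl hnd hseeds
    simp only [List.foldl_cons]
    have hseed := hseeds o List.mem_cons_self
    have hinv : ∀ x ∈ PySem.Set.add keep ((ind.length : Int) - no + o),
        x ∈ [(ind.length : Int) - no + o] ∨ ∀ b ∈ pvChildren ind ni x, b ∈ PySem.Set.add keep ((ind.length : Int) - no + o) := by
      intro x hx
      rcases (PySem.Set.mem_add _ _ _).mp hx with hxk | rfl
      · exact Or.inr (fun b hb => (PySem.Set.mem_add _ _ _).mpr (Or.inl (hcl x hxk b hb)))
      · exact Or.inl (List.mem_singleton.mpr rfl)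
    have hfuel : (1 : Nat) + 2 * pvCnt ind ni (PySem.Set.add keep ((ind.length : Int) - no + o))
        < 2 * pvTotalInputs ind + 2 := by
      have h1 := (pvCnt_le ind ni (PySem.Set.add keep ((ind.length : Int) - no + o))).trans
        (pvAllSrcs_length_le ind ni)
      omega
    have hcl' : pvClosed ind ni (pvALoop ind ni (2 * pvTotalInputs ind + 2)
        [(ind.length : Int) - no + o] (PySem.Set.add keep ((ind.length : Int) - no + o))) :=
      pvALoop_closed ind ni hok _ _ _ (by simpa using hfuel)
        (by intro x hx; rcases List.mem_singleton.mp hx with rfl; exact (PySem.Set.mem_add _ _ _).mpr (Or.inr rfl))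
        (by intro x hx; rcases List.mem_singleton.mp hx with rfl; exact hseed)
        hinv
    have hnd' := pvALoop_nodup ind ni (2 * pvTotalInputs ind + 2)
        [(ind.length : Int) - no + o] (PySem.Set.add keep ((ind.length : Int) - no + o))
        (PySem.Set.nodup_add _ _ hnd)
    have hmono : ∀ y ∈ keep, y ∈ pvALoop ind ni (2 * pvTotalInputs ind + 2)
        [(ind.length : Int) - no + o] (PySem.Set.add keep ((ind.length : Int) - no + o)) := by
      intro y hy
      exact pvALoop_mono ind ni _ _ _ y ((PySem.Set.mem_add _ _ _).mpr (Or.inl hy))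
    have hseedmem : (ind.length : Int) - no + o ∈ pvALoop ind ni (2 * pvTotalInputs ind + 2)
        [(ind.length : Int) - no + o] (PySem.Set.add keep ((ind.length : Int) - no + o)) :=
      pvALoop_mono ind ni _ _ _ _ ((PySem.Set.mem_add _ _ _).mpr (Or.inr rfl))
    obtain ⟨⟨rc, rn⟩, rm, rs⟩ := ih _ hcl' hnd' (fun o' ho' => hseeds o' (List.mem_cons_of_mem _ ho'))
    refine ⟨⟨rc, rn⟩, fun y hy => rm y (hmono y hy), ?_⟩
    intro o' ho'
    rcases List.mem_cons.mp ho' with rfl | ho'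
    · exact rm _ hseedmem
    · exact rs o' ho'

theorem pvAFold_subset (ind : List (List (String × List Int))) (ni no : Int) (C : List Int)
    (hC : pvClosed ind ni C) :
    ∀ (solved : List Int) (keep : List Int), (∀ x ∈ keep, x ∈ C) →
      (∀ o ∈ solved, (ind.length : Int) - no + o ∈ C) →
      ∀ y ∈ solved.foldl (fun keep out_i =>
        pvALoop ind ni (2 * pvTotalInputs ind + 2) [(ind.length : Int) - no + out_i]
          (PySem.Set.add keep ((ind.length : Int) - no + out_i))) keep, y ∈ C := by
  intro solved
  induction solved with
  | nil => intro keep hk _ y hy; exact hk y (by simpa using hy)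
  | cons o rest ih =>
    intro keep hk hseeds y hy
    simp only [List.foldl_cons] at hy
    refine ih _ ?_ (fun o' ho' => hseeds o' (List.mem_cons_of_mem _ ho')) y hy
    intro x hx
    refine pvALoop_subset ind ni C hC _ _ _ ?_ ?_ x hx
    · intro z hz; rcases List.mem_singleton.mp hz with rfl; exact hseeds o List.mem_cons_self
    · intro z hz
      rcases (PySem.Set.mem_add _ _ _).mp hz with hz | rfl
      · exact hk z hz
      · exact hseeds o List.mem_cons_self

theorem pvBFold_facts (ind : List (List (String × List Int))) (ni no : Int)
    (hok : ∀ g ∈ ind, (pvGetInputs g).isSome = true) :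
    ∀ (solved : List Int) (keep : List Int), pvClosed ind ni keep → keep.Nodup →
      (∀ o ∈ solved, -(ind.length : Int) ≤ (ind.length : Int) - no + o) →
      (pvClosed ind ni (solved.foldl (fun keep out_i =>
        pvBVisit ind ni (pvTotalInputs ind + 2) ((ind.length : Int) - no + out_i) keep) keep) ∧
       (solved.foldl (fun keep out_i =>
        pvBVisit ind ni (pvTotalInputs ind + 2) ((ind.length : Int) - no + out_i) keep) keep).Nodup) ∧
      (∀ y ∈ keep, y ∈ solved.foldl (fun keep out_i =>
        pvBVisit ind ni (pvTotalInputs ind + 2) ((ind.length : Int) - no + out_i) keep) keep) ∧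
      (∀ o ∈ solved, (ind.length : Int) - no + o ∈ solved.foldl (fun keep out_i =>
        pvBVisit ind ni (pvTotalInputs ind + 2) ((ind.length : Int) - no + out_i) keep) keep) := by
  intro solved
  induction solved with
  | nil =>
    intro keep hcl hnd _
    exact ⟨⟨hcl, hnd⟩, fun y hy => by simpa using hy, by simp⟩
  | cons o rest ih =>
    intro keep hcl hnd hseeds
    simp only [List.foldl_cons]
    have hseed := hseeds o List.mem_cons_self
    have hfuel : pvCnt ind ni (PySem.Set.add keep ((ind.length : Int) - no + o)) + 1
        ≤ pvTotalInputs ind + 2 := by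
      have h1 := (pvCnt_le ind ni (PySem.Set.add keep ((ind.length : Int) - no + o))).trans
        (pvAllSrcs_length_le ind ni)
      omega
    obtain ⟨hb1, hb2⟩ := pvBVisit_closed ind ni hok (pvTotalInputs ind + 2)
      ((ind.length : Int) - no + o) keep hfuel hseed
    have hmono := pvBVisit_mono ind ni (pvTotalInputs ind + 2) ((ind.length : Int) - no + o) keep
    have hcl' : pvClosed ind ni (pvBVisit ind ni (pvTotalInputs ind + 2)
        ((ind.length : Int) - no + o) keep) := by
      intro x hx b hb
      by_cases hxk : x ∈ keep
      · exact hmono _ (hcl x hxk b hb)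
      · exact hb2 x hx hxk b hb
    have hnd' := pvBVisit_nodup ind ni (pvTotalInputs ind + 2) ((ind.length : Int) - no + o) keep hnd
    obtain ⟨⟨rc, rn⟩, rm, rs⟩ := ih _ hcl' hnd' (fun o' ho' => hseeds o' (List.mem_cons_of_mem _ ho'))
    refine ⟨⟨rc, rn⟩, fun y hy => rm y (hmono y hy), ?_⟩
    intro o' ho'
    rcases List.mem_cons.mp ho' with rfl | ho'
    · exact rm _ hb1
    · exact rs o' ho'

theorem pvBFold_subset2 (ind : List (List (String × List Int))) (ni no : Int) (C : List Int)
    (hC : pvClosed ind ni C) :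
    ∀ (solved : List Int) (keep : List Int), (∀ x ∈ keep, x ∈ C) →
      (∀ o ∈ solved, (ind.length : Int) - no + o ∈ C) →
      ∀ y ∈ solved.foldl (fun keep out_i =>
        pvBVisit ind ni (pvTotalInputs ind + 2) ((ind.length : Int) - no + out_i) keep) keep, y ∈ C := by
  intro solved
  induction solved with
  | nil => intro keep hk _ y hy; exact hk y (by simpa using hy)
  | cons o rest ih =>
    intro keep hk hseeds y hy
    simp only [List.foldl_cons] at hy
    refine ih _ ?_ (fun o' ho' => hseeds o' (List.mem_cons_of_mem _ ho')) y hy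
    intro x hx
    exact pvBVisit_subset ind ni C hC _ _ _ (hseeds o List.mem_cons_self) hk x hx

-- out-of-range seeds: both sides just insert the seed
theorem pvALoop_oob (ind : List (List (String × List Int))) (ni : Int) (f : Nat) (s : Int)
    (k : List Int) (hs : (ind.length : Int) ≤ s) :
    pvALoop ind ni (f + 1) [s] k = k := by
  simp [pvALoop, hs, pvALoop_nil]

theorem pvBVisit_oob (ind : List (List (String × List Int))) (ni : Int) (f : Nat) (s : Int)
    (k : List Int) (hs : (ind.length : Int) ≤ s) :
    pvBVisit ind ni (f + 1) s k = PySem.Set.add k s := by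
  by_cases hc : s ∈ k
  · rw [pvBVisit_contains ind ni _ s k hc, PySem.Set.add_of_mem hc]
  ·    simp [pvBVisit, hc, not_lt.mpr hs]

theorem pvOOB_folds (ind : List (List (String × List Int))) (ni no : Int) :
    ∀ (solved : List Int) (keep : List Int),
      (∀ o ∈ solved, (ind.length : Int) ≤ (ind.length : Int) - no + o) →
      solved.foldl (fun keep out_i =>
        pvALoop ind ni (2 * pvTotalInputs ind + 2) [(ind.length : Int) - no + out_i]
          (PySem.Set.add keep ((ind.length : Int) - no + out_i))) keep
      = solved.foldl (fun keep out_i =>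
        pvBVisit ind ni (pvTotalInputs ind + 2) ((ind.length : Int) - no + out_i) keep) keep := by
  intro solved
  induction solved with
  | nil => intro keep _; rfl
  | cons o rest ih =>
    intro keep hseeds
    have hs := hseeds o List.mem_cons_self
    simp only [List.foldl_cons]
    rw [show (2 * pvTotalInputs ind + 2) = (2 * pvTotalInputs ind + 1) + 1 by omega,
      pvALoop_oob ind ni _ _ _ hs,
      show (pvTotalInputs ind + 2) = (pvTotalInputs ind + 1) + 1 by omega,
      pvBVisit_oob ind ni _ _ _ hs]
    exact ih _ (fun o' ho' => hseeds o' (List.mem_cons_of_mem _ ho'))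

-- ===== VERDICT (by name: the statement is the Claim_ definition above) =====
theorem trace_active_gates_spec : Claim_equal_trace_active_gates := by
  intro ind solved ni no _ hpre
  obtain ⟨hbound, hcase⟩ := hpre
  unfold Spec_trace_active_gates trace_active_gates trace_active_gates_alt
  rcases hcase with hoob | hok
  · rw [pvOOB_folds ind ni no solved PySem.Set.empty hoob]
  · have hFA := pvAFold_facts ind ni no hok solved PySem.Set.empty
      (by intro a ha b hb; simp [PySem.Set.empty] at ha) (by simp [PySem.Set.empty]) hbound
    have hFB := pvBFold_facts ind ni no hok solved PySem.Set.empty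
      (by intro a ha b hb; simp [PySem.Set.empty] at ha) (by simp [PySem.Set.empty]) hbound
    obtain ⟨⟨hAcl, hAnd⟩, _, hAseeds⟩ := hFA
    obtain ⟨⟨hBcl, hBnd⟩, _, hBseeds⟩ := hFB
    have hAB : ∀ y ∈ solved.foldl (fun keep out_i =>
        pvALoop ind ni (2 * pvTotalInputs ind + 2) [(ind.length : Int) - no + out_i]
          (PySem.Set.add keep ((ind.length : Int) - no + out_i))) PySem.Set.empty,
        y ∈ solved.foldl (fun keep out_i =>
        pvBVisit ind ni (pvTotalInputs ind + 2) ((ind.length : Int) - no + out_i) keep) PySem.Set.empty :=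
      pvAFold_subset ind ni no _ hBcl solved PySem.Set.empty
        (by intro x hx; simp [PySem.Set.empty] at hx) hBseeds
    have hBA : ∀ y ∈ solved.foldl (fun keep out_i =>
        pvBVisit ind ni (pvTotalInputs ind + 2) ((ind.length : Int) - no + out_i) keep) PySem.Set.empty,
        y ∈ solved.foldl (fun keep out_i =>
        pvALoop ind ni (2 * pvTotalInputs ind + 2) [(ind.length : Int) - no + out_i]
          (PySem.Set.add keep ((ind.length : Int) - no + out_i))) PySem.Set.empty :=
      pvBFold_subset2 ind ni no _ hAcl solved PySem.Set.empty
        (by intro x hx; simp [PySem.Set.empty] at hx) hAseeds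
    have hperm := (List.perm_ext_iff_of_nodup hAnd hBnd).mpr (fun a => ⟨hAB a, hBA a⟩)
    exact PySem.List.sorted_eq_sorted_of_perm _ _ (fun x => x) (fun a b h => h) hperm
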